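-- pv_equiv track=rewrite | github.com/pypi-data/pypi-mirror-374 | packages/text-chaos/text_chaos-0.1.0-py3-none-any.whl/text_chaos/transformers.py | mock_transform
-- ===== SOURCE A (Python) =====
-- def mock_transform(text: str) -> str:
--     """
--     Transform text to mocking SpongeBob case (alternating caps).
--
--     Args:
--         text: The input text to transform
--
--     Returns:
--         The text in alternating caps
--
--     Example:
--         >>> mock_transform("Hello World")
--         "hElLo WoRlD"
--     """
--     result = ""
--     upper = False
--
--     for char in text:
--         if char.isalpha():
--             result += char.upper() if upper else char.lower()
--             upper = not upper
--         else:
--             result += char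
--
--     return result
-- ===== SOURCE B (Python) =====
-- def mock_transform(text: str) -> str:
--     letters = [c for c in text if c.isalpha()]
--     cased = [c.lower() if i % 2 == 0 else c.upper() for i, c in enumerate(letters)]
--     it = iter(cased)
--     return "".join(next(it) if c.isalpha() else c for c in text)
-- ===== Notes on version B (the rewrite author's own statement) =====
-- stated objective: alternative
-- what changed: Replaces the single stateful toggle loop by a filter/transform/merge decomposition: collect the alphabetic characters, case them by letter-index parity, then reinsert them into the original text from an iterator.
import Mathlib
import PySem

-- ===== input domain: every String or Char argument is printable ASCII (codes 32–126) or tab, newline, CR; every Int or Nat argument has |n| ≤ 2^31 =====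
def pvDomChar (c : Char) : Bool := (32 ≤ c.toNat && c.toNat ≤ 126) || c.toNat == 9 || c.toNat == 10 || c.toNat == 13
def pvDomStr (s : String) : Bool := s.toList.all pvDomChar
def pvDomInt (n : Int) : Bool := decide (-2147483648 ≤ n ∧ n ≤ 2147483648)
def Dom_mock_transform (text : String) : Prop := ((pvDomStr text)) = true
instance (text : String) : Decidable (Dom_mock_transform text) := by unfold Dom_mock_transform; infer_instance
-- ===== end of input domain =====

-- B replaces A's stateful toggle loop with a filter/transform/merge decomposition (letter-index parity casing); alternative, same O(n) cost modulo A's string concatenation.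


-- ===== PORT A =====
def mock_transform (text : String) : String :=
  let r := text.toList.foldl (fun (st : List Char × Bool) c =>
    if PySem.Chars.isalpha c then
      (st.1 ++ [if st.2 then PySem.Chars.upperChar c else PySem.Chars.lowerChar c], !st.2)
    else (st.1 ++ [c], st.2)) ([], false)
  String.mk r.1

-- ===== PORT B =====
-- case a letter by its letter-index parity
def pvCase (i : Int) (c : Char) : Char :=
  if i % 2 = 0 then PySem.Chars.lowerChar c else PySem.Chars.upperChar c

-- the '"".join(next(it) if c.isalpha() else c for c in text)' merge: consume the cased
-- letters in order at each alphabetic position, copy other characters unchanged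
def pvMerge : List Char → List Char → List Char
  | [], _ => []
  | c :: rest, ls =>
    if PySem.Chars.isalpha c then
      match ls with
      | [] => c :: pvMerge rest []
      | l :: ls' => l :: pvMerge rest ls'
    else c :: pvMerge rest ls

def mock_transform_alt (text : String) : String :=
  let letters := text.toList.filter PySem.Chars.isalpha
  let cased := (PySem.List.enumerate letters 0).map (fun p => pvCase p.1 p.2)
  String.mk (pvMerge text.toList cased)

-- ===== PRECONDITION & SPEC =====
def Spec_mock_transform (text : String) (out : String) : Prop := out = mock_transform_alt text
instance (text : String) (out : String) : Decidable (Spec_mock_transform text out) := by unfold Spec_mock_transform; infer_instance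

-- ===== CLAIM (what is proved, stated in full; the proofs are below) =====
def Claim_equal_mock_transform : Prop := ∀ (text : String), Dom_mock_transform text → Spec_mock_transform text (mock_transform text)

-- ===== LEMMAS AND PROOFS =====

-- A's toggled casing of a letter list, starting from flag u
def pvCaseFrom (u : Bool) : List Char → List Char
  | [] => []
  | c :: cs => (if u then PySem.Chars.upperChar c else PySem.Chars.lowerChar c) :: pvCaseFrom (!u) cs

theorem pvCaseFrom_eq_enum : ∀ (ls : List Char) (n : Nat),
    pvCaseFrom (decide (n % 2 = 1)) ls
      = (PySem.List.enumerate ls (n : Int)).map (fun p => pvCase p.1 p.2) := by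
  intro ls
  induction ls with
  | nil => intro n; simp [pvCaseFrom, PySem.List.enumerate]
  | cons c cs ih =>
    intro n
    simp only [pvCaseFrom, PySem.List.enumerate, List.map_cons]
    have hcast : ((n : Int) + 1) = ((n + 1 : Nat) : Int) := by push_cast; ring
    rw [hcast, ← ih (n + 1)]
    by_cases h : n % 2 = 1
    · have h1 : ¬ ((n : Int) % 2 = 0) := by omega
      have h2 : ¬ ((n + 1) % 2 = 1) := by omega
      simp [pvCase, h, h1, h2]
    · have h1 : ((n : Int) % 2 = 0) := by omega
      have h2 : ((n + 1) % 2 = 1) := by omega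
      simp [pvCase, h, h1, h2]

theorem pvFold_eq_merge : ∀ (cs : List Char) (acc : List Char) (u : Bool),
    (cs.foldl (fun (st : List Char × Bool) c =>
        if PySem.Chars.isalpha c then
          (st.1 ++ [if st.2 then PySem.Chars.upperChar c else PySem.Chars.lowerChar c], !st.2)
        else (st.1 ++ [c], st.2)) (acc, u)).1
      = acc ++ pvMerge cs (pvCaseFrom u (cs.filter PySem.Chars.isalpha)) := by
  intro cs
  induction cs with
  | nil => intro acc u; simp [pvMerge]
  | cons c rest ih =>
    intro acc u
    by_cases h : PySem.Chars.isalpha c = true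
    · simp [h, List.foldl_cons, ih, pvCaseFrom, pvMerge]
    · simp [h, List.foldl_cons, ih, pvMerge]

-- ===== VERDICT (by name: the statement is the Claim_ definition above) =====
theorem mock_transform_spec : Claim_equal_mock_transform := by
  intro text _
  unfold Spec_mock_transform mock_transform mock_transform_alt
  have h := pvFold_eq_merge text.toList [] false
  simp only [List.nil_append] at h
  have h2 := pvCaseFrom_eq_enum (text.toList.filter PySem.Chars.isalpha) 0
  have h0 : (decide (0 % 2 = 1)) = false := by decide
  rw [h0] at h2
  simp only [Nat.cast_zero] at h2
  simp only [h, h2]
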